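-- pv_equiv track=rewrite | github.com/seanodell/home-projects | mcp/actions/project_pdf.py | _wrap_lists
-- ===== SOURCE A (Python) =====
-- def _wrap_lists(tex_body):
--     """Wrap consecutive \\item lines in itemize environments."""
--     lines = tex_body.split("\n")
--     result = []
--     in_list = False
--
--     for line in lines:
--         is_item = line.strip().startswith(r"\item")
--
--         if is_item and not in_list:
--             result.append(r"\begin{itemize}[leftmargin=1.5em,labelsep=0.5em]")
--             in_list = True
--         elif not is_item and in_list:
--             result.append(r"\end{itemize}")
--             in_list = False
--
--         result.append(line)
--
--     if in_list:
--         result.append(r"\end{itemize}")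
--
--     return "\n".join(result)
-- ===== SOURCE B (Python) =====
-- def _wrap_lists(tex_body):
--     """Wrap consecutive \\item lines in itemize environments."""
--     lines = tex_body.split("\n")
--     out = []
--     i = 0
--     n = len(lines)
--     while i < n:
--         k = lines[i].strip().startswith(r"\item")
--         j = i
--         while j < n and lines[j].strip().startswith(r"\item") == k:
--             j += 1
--         if k:
--             out.append(r"\begin{itemize}[leftmargin=1.5em,labelsep=0.5em]")
--             out.extend(lines[i:j])
--             out.append(r"\end{itemize}")
--         else:
--             out.extend(lines[i:j])
--         i = j
--     return "\n".join(out)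
-- ===== Notes on version B (the rewrite author's own statement) =====
-- stated objective: alternative
-- what changed: Replaces A's per-line state machine (in_list flag plus post-loop flush) with a run-based scan that finds each maximal run of same-key lines and emits it wrapped or plain, with no carried flag and no flush.
import Mathlib
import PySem

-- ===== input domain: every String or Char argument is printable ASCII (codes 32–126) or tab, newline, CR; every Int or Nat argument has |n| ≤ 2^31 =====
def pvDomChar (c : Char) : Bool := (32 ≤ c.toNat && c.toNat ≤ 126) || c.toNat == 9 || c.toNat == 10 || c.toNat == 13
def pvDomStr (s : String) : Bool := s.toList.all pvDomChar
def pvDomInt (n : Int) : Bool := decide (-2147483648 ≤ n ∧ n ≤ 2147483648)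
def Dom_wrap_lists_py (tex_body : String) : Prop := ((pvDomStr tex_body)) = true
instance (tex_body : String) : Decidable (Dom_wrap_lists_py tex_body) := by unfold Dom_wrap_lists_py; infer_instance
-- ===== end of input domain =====

-- B replaces A's in_list flag machine (with its post-loop flush) by a run-based scan over maximal same-key runs (alternative decomposition, same cost).

-- line.strip().startswith(r"\item") — the key both programs compute per line
def pvIsItem (line : String) : Bool := PySem.Str.startswith (PySem.Str.strip line) "\\item"

-- ===== PORT A =====
-- the body of A's for-loop, acting on the state (result, in_list)
def pvStepA (st : List String × Bool) (line : String) : List String × Bool :=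
  let is_item := pvIsItem line
  let st' :=
    if is_item && !st.2 then
      (st.1 ++ ["\\begin{itemize}[leftmargin=1.5em,labelsep=0.5em]"], true)
    else if !is_item && st.2 then
      (st.1 ++ ["\\end{itemize}"], false)
    else st
  (st'.1 ++ [line], st'.2)

def wrap_lists_py (tex_body : String) : String :=
  let lines := (PySem.Str.split? tex_body "\n").getD []   -- sep "\n" ≠ "", so split? is always some
  let st := lines.foldl pvStepA ([], false)
  let result := if st.2 then st.1 ++ ["\\end{itemize}"] else st.1
  PySem.Str.join "\n" result

-- ===== PORT B =====
-- Source B's outer while loop: each step takes the maximal run of lines with the same key and emits it (wrapped iff the key is true)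
def pvGroups : List String → List String
  | [] => []
  | l :: ls =>
    let run := ls.takeWhile (fun x => pvIsItem x == pvIsItem l)
    let rest := ls.dropWhile (fun x => pvIsItem x == pvIsItem l)
    (if pvIsItem l then
      "\\begin{itemize}[leftmargin=1.5em,labelsep=0.5em]" :: (l :: run) ++ ["\\end{itemize}"]
     else l :: run) ++ pvGroups rest
termination_by ls => ls.length
decreasing_by exact Nat.lt_succ_of_le (List.length_dropWhile_le _ _)

def wrap_lists_py_alt (tex_body : String) : String :=
  PySem.Str.join "\n" (pvGroups ((PySem.Str.split? tex_body "\n").getD []))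

-- ===== PRECONDITION & SPEC =====
def Spec_wrap_lists_py (tex_body : String) (out : String) : Prop := out = wrap_lists_py_alt tex_body
instance (tex_body : String) (out : String) : Decidable (Spec_wrap_lists_py tex_body out) := by unfold Spec_wrap_lists_py; infer_instance

-- ===== CLAIM (what is proved, stated in full; the proofs are below) =====
def Claim_equal_wrap_lists_py : Prop := ∀ (tex_body : String), Dom_wrap_lists_py tex_body → Spec_wrap_lists_py tex_body (wrap_lists_py tex_body)

-- ===== LEMMAS AND PROOFS =====

-- A's loop + final flush as a structural recursion on the remaining lines, carrying the flag
def pvProcA : List String → Bool → List String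
  | [], b => if b then ["\\end{itemize}"] else []
  | l :: ls, b =>
    if pvIsItem l then
      if b then l :: pvProcA ls true
      else "\\begin{itemize}[leftmargin=1.5em,labelsep=0.5em]" :: l :: pvProcA ls true
    else
      if b then "\\end{itemize}" :: l :: pvProcA ls false
      else l :: pvProcA ls false

lemma pvFoldA (lines : List String) : ∀ (acc : List String) (b : Bool),
    (if (List.foldl pvStepA (acc, b) lines).2 then
       (List.foldl pvStepA (acc, b) lines).1 ++ ["\\end{itemize}"]
     else (List.foldl pvStepA (acc, b) lines).1) = acc ++ pvProcA lines b := by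
  induction lines with
  | nil => intro acc b; cases b <;> simp [pvProcA]
  | cons l ls ih =>
    intro acc b
    rw [List.foldl_cons]
    cases hb : b <;> cases hi : pvIsItem l
    · rw [show pvStepA (acc, false) l = (acc ++ [l], false) from by simp [pvStepA, hi], ih]
      simp [pvProcA, hi]
    · rw [show pvStepA (acc, false) l =
          (acc ++ ["\\begin{itemize}[leftmargin=1.5em,labelsep=0.5em]"] ++ [l], true) from by
            simp [pvStepA, hi], ih]
      simp [pvProcA, hi]
    · rw [show pvStepA (acc, true) l = (acc ++ ["\\end{itemize}"] ++ [l], false) from by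
            simp [pvStepA, hi], ih]
      simp [pvProcA, hi]
    · rw [show pvStepA (acc, true) l = (acc ++ [l], true) from by simp [pvStepA, hi], ih]
      simp [pvProcA, hi]

lemma pvRunTrue (run : List String) (rest : List String)
    (h : ∀ x ∈ run, pvIsItem x = true) :
    pvProcA (run ++ rest) true = run ++ pvProcA rest true := by
  induction run with
  | nil => simp
  | cons r rs ih =>
    have hr : pvIsItem r = true := h r (by simp)
    simp [pvProcA, hr, ih (fun x hx => h x (by simp [hx]))]

lemma pvRunFalse (run : List String) (rest : List String)
    (h : ∀ x ∈ run, pvIsItem x = false) :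
    pvProcA (run ++ rest) false = run ++ pvProcA rest false := by
  induction run with
  | nil => simp
  | cons r rs ih =>
    have hr : pvIsItem r = false := h r (by simp)
    simp [pvProcA, hr, ih (fun x hx => h x (by simp [hx]))]

lemma pvMain (ls : List String) : pvProcA ls false = pvGroups ls := by
  induction ls using pvGroups.induct with
  | case1 => simp [pvProcA, pvGroups]
  | case2 l ls rest0 ih =>
    rw [pvGroups]
    set run := ls.takeWhile (fun x => pvIsItem x == pvIsItem l) with hrun
    set rest := ls.dropWhile (fun x => pvIsItem x == pvIsItem l) with hrest
    have hih : pvProcA rest false = pvGroups rest := ih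
    have hsplit : ls = run ++ rest := by
      rw [hrun, hrest]; exact (List.takeWhile_append_dropWhile).symm
    cases hi : pvIsItem l with
    | true =>
      have hall : ∀ x ∈ run, pvIsItem x = true := by
        intro x hx
        rw [hrun] at hx
        simpa [hi] using List.mem_takeWhile_imp hx
      have hrest' : pvProcA rest true = "\\end{itemize}" :: pvProcA rest false := by
        cases hre : rest with
        | nil => simp [pvProcA]
        | cons r rs =>
          have hh := List.head?_dropWhile_not (fun x => pvIsItem x == pvIsItem l) ls
          rw [← hrest] at hh
          rw [hre] at hh
          simp only [List.head?_cons] at hh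
          have hr : pvIsItem r = false := by simpa [hi] using hh
          simp [pvProcA, hr]
      have hstep : pvProcA (l :: ls) false =
          "\\begin{itemize}[leftmargin=1.5em,labelsep=0.5em]" :: l :: pvProcA ls true := by
        simp [pvProcA, hi]
      rw [hstep, hsplit, pvRunTrue run rest hall, hrest', hih]
      simp
    | false =>
      have hall : ∀ x ∈ run, pvIsItem x = false := by
        intro x hx
        rw [hrun] at hx
        simpa [hi] using List.mem_takeWhile_imp hx
      have hstep : pvProcA (l :: ls) false = l :: pvProcA ls false := by
        simp [pvProcA, hi]
      rw [hstep, hsplit, pvRunFalse run rest hall, hih]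
      simp

-- ===== VERDICT (by name: the statement is the Claim_ definition above) =====
theorem wrap_lists_py_spec : Claim_equal_wrap_lists_py := by
  intro tex_body _
  unfold Spec_wrap_lists_py
  have hA : wrap_lists_py tex_body =
      PySem.Str.join "\n" ([] ++ pvProcA ((PySem.Str.split? tex_body "\n").getD []) false) := by
    rw [← pvFoldA ((PySem.Str.split? tex_body "\n").getD []) [] false]; rfl
  rw [hA, pvMain]
  simp [wrap_lists_py_alt]
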